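-- pv_equiv track=rewrite | github.com/pypi-data/pypi-mirror-404 | packages/cicada-mcp/cicada_mcp-0.6.1-py3-none-any.whl/cicada/cooccurrence.py | _split_identifier
-- ===== SOURCE A (Python) =====
-- def _split_identifier(identifier: str) -> set[str]:
--     """
--     Split an identifier into component words.
--
--     Handles snake_case, camelCase, and PascalCase.
--
--     Args:
--         identifier: The identifier to split (e.g., "validate_provider_key")
--
--     Returns:
--         Set of lowercase component words
--     """
--     if not identifier:
--         return set()
--
--     # Replace underscores with spaces
--     identifier = identifier.replace("_", " ")
--
--     # Insert spaces before capital letters (for camelCase/PascalCase)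
--     result: list[str] = []
--     for i, char in enumerate(identifier):
--         if char.isupper() and i > 0 and identifier[i - 1].islower():
--             result.append(" ")
--         result.append(str(char))
--
--     identifier = "".join(result)
--
--     # Split on spaces and filter out short words
--     parts = identifier.lower().split()
--     return {p for p in parts if len(p) >= 3}
-- ===== SOURCE B (Python) =====
-- def _split_identifier(identifier: str) -> set[str]:
--     """One-pass tokenizer: scan characters once, flushing word buffers into the
--     result set, instead of building spaced intermediate strings."""
--     words: set[str] = set()
--     buf: list[str] = []
--     prev = ""  # previous raw character; "" (not lowercase) before the first one
--     for ch in identifier: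
--         if ch == "_" or ch.isspace():
--             if len(buf) >= 3:
--                 words.add("".join(buf))
--             buf = []
--         elif ch.isupper() and prev.islower():
--             if len(buf) >= 3:
--                 words.add("".join(buf))
--             buf = [ch.lower()]
--         else:
--             buf.append(ch.lower())
--         prev = ch
--     if len(buf) >= 3:
--         words.add("".join(buf))
--     return words
-- ===== Notes on version B (the rewrite author's own statement) =====
-- stated objective: alternative
-- what changed: Replaces A's four-stage pipeline (underscore replacement, space-insertion pass over an enumerated copy, lowering, whitespace split, filter+set) by a single-pass tokenizer that scans the characters once, maintaining a word buffer and flushing it into the result set at separators and camelCase boundaries, never building the intermediate spaced string.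
import Mathlib
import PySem

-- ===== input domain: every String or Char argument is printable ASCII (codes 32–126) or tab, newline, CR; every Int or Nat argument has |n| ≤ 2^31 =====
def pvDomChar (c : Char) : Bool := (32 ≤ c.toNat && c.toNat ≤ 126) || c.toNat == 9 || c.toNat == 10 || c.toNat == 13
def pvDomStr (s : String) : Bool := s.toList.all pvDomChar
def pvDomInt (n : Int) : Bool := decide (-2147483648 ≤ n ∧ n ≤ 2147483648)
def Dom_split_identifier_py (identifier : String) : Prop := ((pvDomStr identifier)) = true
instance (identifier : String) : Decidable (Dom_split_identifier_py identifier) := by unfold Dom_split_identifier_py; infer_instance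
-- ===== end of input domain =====

-- B restructures A (pipeline of string passes) into a one-pass tokenizer with a word buffer.
-- Both return a Python set (here: the list of distinct words in first-appearance order).

-- ===== PORT A =====
-- the 'for i, char in enumerate(identifier)' loop, carrying the index i
def pvAGo (ident : List Char) : Nat → List Char → List Char → List Char
  | _, [], result => result
  | i, c :: rest, result =>
    let result :=
      if PySem.Chars.isupper c && decide (0 < i)
          && ((PySem.List.pyGet? ident ((i : Int) - 1)).elim false PySem.Chars.islower)
      then result ++ [' '] else result
    pvAGo ident (i + 1) rest (result ++ [c])

def split_identifier_py (identifier : String) : List String :=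
  if identifier = "" then PySem.Set.empty
  else
    let identifier := PySem.Str.replace identifier "_" " "
    let result := pvAGo identifier.toList 0 identifier.toList []
    let identifier := String.ofList result
    let parts := PySem.Str.split₀ (PySem.Str.lower identifier)
    PySem.Set.ofList (parts.filter (fun p => 3 ≤ PySem.Str.len p))

-- ===== PORT B =====
-- flush: add the buffered word (if long enough) to the result set
def pvFlush (out : PySem.Set String) (buf : List Char) : PySem.Set String :=
  if 3 ≤ buf.length then PySem.Set.add out (String.ofList buf) else out

def pvStep (st : PySem.Set String × List Char × Char) (ch : Char) :
    PySem.Set String × List Char × Char :=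
  let (out, buf, prev) := st
  if ch = '_' || PySem.Chars.isspace ch then (pvFlush out buf, [], ch)
  else if PySem.Chars.isupper ch && PySem.Chars.islower prev then
    (pvFlush out buf, [PySem.Chars.lowerChar ch], ch)
  else (out, buf ++ [PySem.Chars.lowerChar ch], ch)

-- initial prev is a sentinel non-lowercase character (Python B uses "")
def split_identifier_py_alt (identifier : String) : List String :=
  let st := identifier.toList.foldl pvStep (PySem.Set.empty, [], ' ')
  pvFlush st.1 st.2.1

-- ===== PRECONDITION & SPEC =====
def Spec_split_identifier_py (identifier : String) (out : List String) : Prop := out = split_identifier_py_alt identifier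
instance (identifier : String) (out : List String) : Decidable (Spec_split_identifier_py identifier out) := by unfold Spec_split_identifier_py; infer_instance

-- ===== CLAIM (what is proved, stated in full; the proofs are below) =====
def Claim_equal_split_identifier_py : Prop := ∀ (identifier : String), Dom_split_identifier_py identifier → Spec_split_identifier_py identifier (split_identifier_py identifier)

-- ===== LEMMAS AND PROOFS =====

-- underscore replacement as a per-character map
def pvRepl (c : Char) : Char := if c = '_' then ' ' else c

-- A's space-insertion pass, as clean structural recursion on the (replaced) chars
def pvSpacedGo (prev : Char) : List Char → List Char
  | [] => []
  | c :: t =>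
      (if PySem.Chars.isupper c && PySem.Chars.islower prev then [' ', c] else [c])
        ++ pvSpacedGo c t

-- the final lowered, spaced character stream, expressed over the RAW chars
def pvE (prev c : Char) : List Char :=
  if PySem.Chars.isupper (pvRepl c) && PySem.Chars.islower (pvRepl prev)
  then [' ', PySem.Chars.lowerChar (pvRepl c)]
  else [PySem.Chars.lowerChar (pvRepl c)]

def pvEGo (prev : Char) : List Char → List Char
  | [] => []
  | c :: t => pvE prev c ++ pvEGo c t

-- ---- character-level facts ----

lemma pv_isspace_iff (c : Char) : PySem.Chars.isspace c = true ↔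
    (c.toNat = 32 ∨ (9 ≤ c.toNat ∧ c.toNat ≤ 13) ∨ (28 ≤ c.toNat ∧ c.toNat ≤ 31) ∨
     c.toNat = 133 ∨ c.toNat = 160 ∨ c.toNat = 5760 ∨
     (8192 ≤ c.toNat ∧ c.toNat ≤ 8202) ∨ c.toNat = 8232 ∨ c.toNat = 8233 ∨
     c.toNat = 8239 ∨ c.toNat = 8287 ∨ c.toNat = 12288) := by
  simp [PySem.Chars.isspace]; omega

lemma pv_isupper_bounds {c : Char} (h : PySem.Chars.isupper c = true) :
    65 ≤ c.toNat ∧ c.toNat ≤ 90 := by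
  simpa [PySem.Chars.isupper, Char.le_def] using h

lemma pv_lowerChar_of_upper {c : Char} (h : PySem.Chars.isupper c = true) :
    (PySem.Chars.lowerChar c).toNat = c.toNat + 32 := by
  have hb := pv_isupper_bounds h
  have hv : Nat.isValidChar (c.toNat + 32) := Or.inl (by omega)
  simp [PySem.Chars.lowerChar, h, Char.toNat_ofNat, hv]

lemma pv_lowerChar_of_not_upper {c : Char} (h : PySem.Chars.isupper c = false) :
    PySem.Chars.lowerChar c = c := by
  simp [PySem.Chars.lowerChar, h]

lemma pv_isspace_lowerChar (c : Char) :
    PySem.Chars.isspace (PySem.Chars.lowerChar c) = PySem.Chars.isspace c := by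
  by_cases h : PySem.Chars.isupper c = true
  · have hb := pv_isupper_bounds h
    have h1 : PySem.Chars.isspace (PySem.Chars.lowerChar c) = false := by
      rw [← Bool.not_eq_true, pv_isspace_iff, pv_lowerChar_of_upper h]; omega
    have h2 : PySem.Chars.isspace c = false := by
      rw [← Bool.not_eq_true, pv_isspace_iff]; omega
    rw [h1, h2]
  · rw [pv_lowerChar_of_not_upper (by simpa using h)]

lemma pv_isupper_repl (c : Char) (hc : c ≠ '_') : pvRepl c = c := by
  simp [pvRepl, hc]

lemma pv_islower_repl (c : Char) :
    PySem.Chars.islower (pvRepl c) = PySem.Chars.islower c := by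
  by_cases h : c = '_'
  · subst h; decide
  · rw [pv_isupper_repl c h]

-- ---- A's pipeline, simplified ----

lemma pv_replace_go (fuel : Nat) : ∀ (l acc : List Char), l.length ≤ fuel →
    PySem.Chars.replace.go ['_'] [' '] fuel l acc = acc.reverse ++ l.map pvRepl := by
  induction fuel with
  | zero => intro l acc h; cases l with
    | nil => simp [PySem.Chars.replace.go]
    | cons c t => simp at h
  | succ n ih =>
    intro l acc h
    cases l with
    | nil => simp [PySem.Chars.replace.go]
    | cons c t =>
      simp only [PySem.Chars.replace.go]
      by_cases hc : c = '_'
      · subst hc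
        rw [if_pos (by simp [List.isPrefixOf])]
        rw [ih _ _ (by simpa using Nat.le_of_succ_le_succ h)]
        simp [pvRepl]
      · rw [if_neg (by simp [List.isPrefixOf]; exact fun h => hc h.symm)]
        rw [ih _ _ (by simpa using Nat.le_of_succ_le_succ h)]
        simp [pvRepl, hc]

lemma pv_replace_eq (l : List Char) :
    PySem.Chars.replace l ['_'] [' '] = l.map pvRepl := by
  simp only [PySem.Chars.replace]
  rw [if_neg (by decide)]
  simpa using pv_replace_go l.length l [] le_rfl

lemma pv_aGo_spec (rest : List Char) : ∀ (pre result : List Char),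
    pvAGo (pre ++ rest) pre.length rest result
      = result ++ pvSpacedGo (pre.getLastD ' ') rest := by
  induction rest with
  | nil => intro pre result; simp [pvAGo, pvSpacedGo]
  | cons c t ih =>
    intro pre result
    simp only [pvAGo, pvSpacedGo]
    have hguard : (PySem.Chars.isupper c && decide (0 < pre.length)
        && ((PySem.List.pyGet? (pre ++ c :: t) ((pre.length : Int) - 1)).elim false PySem.Chars.islower))
        = (PySem.Chars.isupper c && PySem.Chars.islower (pre.getLastD ' ')) := by
      cases pre with
      | nil =>
        have hsl : PySem.Chars.islower ' ' = false := by decide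
        simp [hsl]
      | cons p ps =>
        have h1 : (((p :: ps).length : Int)) - 1 = ((ps.length : Nat) : Int) := by simp
        rw [h1, PySem.List.pyGet?_natCast]
        have h2 : ps.length < (p :: ps ++ c :: t).length := by simp
        rw [List.getElem?_eq_getElem h2]
        have h4 : (p :: ps)[ps.length]? = some ((p :: ps).getLastD ' ') := by
          rw [List.getLastD_eq_getLast?, List.getLast?_eq_getElem?]; simp
        have h3 : (p :: ps ++ c :: t)[ps.length]'h2 = (p :: ps).getLastD ' ' := by
          have h5 : (p :: ps ++ c :: t)[ps.length]? = (p :: ps)[ps.length]? :=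
            List.getElem?_append_left (by simp)
          rw [List.getElem?_eq_getElem h2, h4] at h5
          exact Option.some_injective _ h5
        rw [h3]
        simp [List.getLastD_eq_getLast?]
    rw [hguard]
    have hrw : pre ++ c :: t = (pre ++ [c]) ++ t := by simp
    have hlen : pre.length + 1 = (pre ++ [c]).length := by simp
    rw [hrw, hlen, ih (pre ++ [c])]
    have hlast : (pre ++ [c]).getLastD ' ' = c := by simp
    rw [hlast]
    split_ifs with hcond
    · simp
    · simp

-- lowering the spaced stream of the replaced chars gives pvEGo on the raw chars
lemma pv_lower_spaced (l : List Char) : ∀ (prev : Char),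
    (pvSpacedGo (pvRepl prev) (l.map pvRepl)).map PySem.Chars.lowerChar = pvEGo prev l := by
  induction l with
  | nil => intro prev; simp [pvSpacedGo, pvEGo]
  | cons c t ih =>
    intro prev
    simp only [List.map_cons, pvSpacedGo, pvEGo, pvE]
    rw [List.map_append, ih c]
    by_cases h : (PySem.Chars.isupper (pvRepl c) && PySem.Chars.islower (pvRepl prev)) = true
    · have hsp : PySem.Chars.lowerChar ' ' = ' ' := by decide
      simp [h, hsp]
    · simp [h]

-- split₀.go's accumulator peels off
lemma pv_split₀_go_acc (s : List Char) : ∀ (cur : List Char) (acc : List (List Char)),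
    PySem.Chars.split₀.go s cur acc = acc.reverse ++ PySem.Chars.split₀.go s cur [] := by
  induction s with
  | nil =>
    intro cur acc
    simp only [PySem.Chars.split₀.go]
    by_cases h : cur.isEmpty = true <;> simp [h]
  | cons c t ih =>
    intro cur acc
    simp only [PySem.Chars.split₀.go]
    by_cases hs : PySem.Chars.isspace c = true
    · simp only [hs, if_pos]
      by_cases h : cur.isEmpty = true
      · simp only [h, if_pos]
        exact ih [] acc
      · simp only [Bool.not_eq_true] at h
        simp only [h]
        rw [ih [] (cur.reverse :: acc), ih [] [cur.reverse]]
        simp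
    · simp only [Bool.not_eq_true] at hs
      simp only [hs]
      exact ih _ acc


-- one step of split₀.go on a whitespace / non-whitespace head
lemma pv_go_space (d : Char) (s cur : List Char) (hd : PySem.Chars.isspace d = true) :
    PySem.Chars.split₀.go (d :: s) cur []
      = (if cur = [] then [] else [cur.reverse]) ++ PySem.Chars.split₀.go s [] [] := by
  simp only [PySem.Chars.split₀.go, hd, if_pos]
  by_cases h : cur = []
  · subst h; simp
  · have he : cur.isEmpty = false := by simpa [List.isEmpty_iff] using h
    simp only [he, Bool.false_eq_true, if_neg, if_false]
    rw [pv_split₀_go_acc s [] [cur.reverse]]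
    simp [h]

lemma pv_go_nonspace (d : Char) (s cur : List Char) (hd : PySem.Chars.isspace d = false) :
    PySem.Chars.split₀.go (d :: s) cur [] = PySem.Chars.split₀.go s (d :: cur) [] := by
  simp only [PySem.Chars.split₀.go, hd]
  simp

-- flushing an empty buffer is a no-op, a nonempty flushed word folds off
lemma pv_foldl_flush_prefix (out : PySem.Set String) (buf : List Char) (ws : List (List Char)) :
    ((if buf = [] then [] else [buf]) ++ ws).foldl pvFlush out = ws.foldl pvFlush (pvFlush out buf) := by
  by_cases h : buf = []
  · subst h; simp [pvFlush]
  · simp [h]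

-- the main B-loop invariant
lemma pv_b_loop (l : List Char) : ∀ (out : PySem.Set String) (buf : List Char) (prev : Char),
    (let st := l.foldl pvStep (out, buf, prev); pvFlush st.1 st.2.1)
      = (PySem.Chars.split₀.go (pvEGo prev l) buf.reverse []).foldl pvFlush out := by
  induction l with
  | nil =>
    intro out buf prev
    simp only [List.foldl_nil, pvEGo, PySem.Chars.split₀.go]
    by_cases h : buf.isEmpty = true
    · have : buf = [] := by simpa [List.isEmpty_iff] using h
      subst this; simp [pvFlush]
    · simp only [List.isEmpty_iff] at h
      simp [h, pvFlush]
  | cons c t ih =>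
    intro out buf prev
    simp only [List.foldl_cons, pvEGo]
    by_cases h1 : (c = '_' ∨ PySem.Chars.isspace c = true)
    · -- separator: the emitted char is whitespace
      have hstep : pvStep (out, buf, prev) c = (pvFlush out buf, [], c) := by
        simp only [pvStep]
        rw [if_pos (by rcases h1 with h | h <;> simp [h])]
      have hup : PySem.Chars.isupper (pvRepl c) = false := by
        rcases h1 with h | h
        · subst h; decide
        · have hcu : c ≠ '_' := by rintro rfl; exact absurd h (by decide)
          rw [pv_isupper_repl c hcu]
          rw [← Bool.not_eq_true]
          intro hc
          have hb := pv_isupper_bounds hc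
          rw [pv_isspace_iff] at h
          omega
      have hsp : PySem.Chars.isspace (PySem.Chars.lowerChar (pvRepl c)) = true := by
        rw [pv_lowerChar_of_not_upper hup]
        by_cases hcu : c = '_'
        · subst hcu; decide
        · rw [pv_isupper_repl c hcu]; rcases h1 with h | h
          · exact absurd h hcu
          · exact h
      have hE : pvE prev c = [PySem.Chars.lowerChar (pvRepl c)] := by
        simp [pvE, hup]
      rw [hstep, hE]
      rw [ih (pvFlush out buf) [] c]
      simp only [List.cons_append, List.nil_append]
      rw [pv_go_space _ _ _ hsp]
      simp only [List.reverse_reverse, List.reverse_eq_nil_iff, List.reverse_nil]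
      rw [pv_foldl_flush_prefix]
    · push_neg at h1
      obtain ⟨hcu, hcs⟩ := h1
      replace hcs : PySem.Chars.isspace c = false := by simpa using hcs
      have hrc : pvRepl c = c := pv_isupper_repl c hcu
      have hlsp : PySem.Chars.isspace (PySem.Chars.lowerChar c) = false := by
        rw [pv_isspace_lowerChar]; exact hcs
      by_cases h2 : (PySem.Chars.isupper c && PySem.Chars.islower prev) = true
      · -- camelCase boundary: emits space + lowered char
        have hstep : pvStep (out, buf, prev) c
            = (pvFlush out buf, [PySem.Chars.lowerChar c], c) := by
          simp only [pvStep]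
          rw [if_neg (by simp [hcu, hcs]), if_pos h2]
        have hE : pvE prev c = [' ', PySem.Chars.lowerChar c] := by
          simp only [pvE, hrc, pv_islower_repl]
          rw [if_pos h2]
        rw [hstep, hE]
        rw [ih (pvFlush out buf) [PySem.Chars.lowerChar c] c]
        simp only [List.cons_append, List.nil_append]
        rw [pv_go_space _ _ _ (by decide), pv_go_nonspace _ _ _ hlsp]
        simp only [List.reverse_reverse, List.reverse_eq_nil_iff]
        rw [pv_foldl_flush_prefix]
        simp
      · -- plain char: append lowered char to the buffer
        have hstep : pvStep (out, buf, prev) c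
            = (out, buf ++ [PySem.Chars.lowerChar c], c) := by
          simp only [pvStep]
          rw [if_neg (by simp [hcu, hcs]), if_neg h2]
        have hE : pvE prev c = [PySem.Chars.lowerChar c] := by
          simp only [pvE, hrc, pv_islower_repl]
          rw [if_neg h2]
        rw [hstep, hE]
        rw [ih out (buf ++ [PySem.Chars.lowerChar c]) c]
        simp only [List.cons_append, List.nil_append]
        rw [pv_go_nonspace _ _ _ hlsp]
        simp

-- folding filtered Set.ofList equals folding with the length guard
lemma pv_ofList_filter (parts : List (List Char)) : ∀ (out : PySem.Set String),
    ((parts.map String.ofList).filter (fun p => 3 ≤ PySem.Str.len p)).foldl PySem.Set.add out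
      = parts.foldl pvFlush out := by
  induction parts with
  | nil => intro out; simp
  | cons w t ih =>
    intro out
    by_cases h : (3 : Int) ≤ PySem.Str.len (String.ofList w)
    · have hl : 3 ≤ w.length := by
        simpa [PySem.Str.len] using h
      simp only [List.map_cons, List.filter_cons, h, decide_true, if_pos, List.foldl_cons]
      rw [ih]
      simp [pvFlush, hl]
    · have hl : ¬ 3 ≤ w.length := by
        simp only [PySem.Str.len] at h
        intro hc; apply h; simp; omega
      simp only [List.map_cons, List.filter_cons]
      rw [if_neg (by simpa using h)]
      simp only [List.foldl_cons]
      rw [ih]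
      simp [pvFlush, hl]

-- ===== VERDICT (by name: the statement is the Claim_ definition above) =====
theorem split_identifier_py_spec : Claim_equal_split_identifier_py := by
  intro identifier _
  show split_identifier_py identifier = split_identifier_py_alt identifier
  by_cases hemp : identifier = ""
  · subst hemp; decide
  · unfold split_identifier_py split_identifier_py_alt
    rw [if_neg hemp]
    simp only []
    -- A side: rewrite the pipeline into foldl pvFlush over the tokenized stream
    have hrep : (PySem.Str.replace identifier "_" " ").toList = identifier.toList.map pvRepl := by
      rw [PySem.Str.toList_replace]
      have : ("_" : String).toList = ['_'] := by decide
      rw [this]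
      have : (" " : String).toList = [' '] := by decide
      rw [this]
      exact pv_replace_eq _
    have hA : pvAGo (PySem.Str.replace identifier "_" " ").toList 0
          (PySem.Str.replace identifier "_" " ").toList []
        = pvSpacedGo ' ' (identifier.toList.map pvRepl) := by
      rw [hrep]
      have := pv_aGo_spec (identifier.toList.map pvRepl) [] []
      simpa using this
    rw [hA]
    have hlow : (PySem.Str.lower (String.ofList (pvSpacedGo ' ' (identifier.toList.map pvRepl)))).toList
        = pvEGo ' ' identifier.toList := by
      rw [PySem.Str.toList_lower]
      show PySem.Chars.lower _ = _
      simp only [PySem.Chars.lower, String.toList_ofList]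
      have hps : pvRepl ' ' = ' ' := by decide
      have hls := pv_lower_spaced identifier.toList ' '
      rw [hps] at hls
      exact hls
    simp only [PySem.Str.split₀, hlow]
    rw [PySem.Set.ofList_eq_foldl, pv_ofList_filter]
    rw [show ∀ m : List Char, PySem.Chars.split₀ m = PySem.Chars.split₀.go m [] [] from fun _ => rfl]
    -- B side
    rw [pv_b_loop identifier.toList PySem.Set.empty [] ' ']
    simp [pvEGo, PySem.Set.empty]
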